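-- pv_equiv track=rewrite | github.com/devesh950/OmniCare-AI--Unified-Help-Across-Research-Educations-Healthcare | agents/accessibility_agent.py | _identify_pause_points
-- ===== SOURCE A (Python) =====
-- from typing import Dict, List
--
-- def _identify_pause_points(text: str) -> List[int]:
--     """Identify natural pause points for audio"""
--     pause_points = []
--
--     # Add pauses at section breaks
--     lines = text.split('\n')
--     char_count = 0
--
--     for line in lines:
--         if line.strip().startswith('##'):
--             pause_points.append(char_count)
--         char_count += len(line) + 1
--
--     return pause_points
-- ===== SOURCE B (Python) =====
-- def _identify_pause_points(text: str):
--     """Identify natural pause points for audio.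
--
--     Single suffix-walking scan: instead of splitting the text into lines and
--     accumulating a character counter, walk from line start to line start with
--     str.find, keeping the absolute offset directly.
--     """
--     pause_points = []
--     offset = 0
--     rest = text
--     while True:
--         # leading-whitespace skip that cannot cross the newline
--         if rest.lstrip(' \t\r\x0b\x0c').startswith('##'):
--             pause_points.append(offset)
--         nl = rest.find('\n')
--         if nl == -1:
--             return pause_points
--         offset += nl + 1
--         rest = rest[nl + 1:]
-- ===== Notes on version B (the rewrite author's own statement) =====
-- stated objective: alternative
-- what changed: Instead of splitting the text into a list of lines and accumulating a running character counter per line, B walks the text suffix-to-suffix with str.find on the newline character, keeping the absolute line-start offset directly and testing each line start with a newline-safe lstrip+startswith.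
import Mathlib
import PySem

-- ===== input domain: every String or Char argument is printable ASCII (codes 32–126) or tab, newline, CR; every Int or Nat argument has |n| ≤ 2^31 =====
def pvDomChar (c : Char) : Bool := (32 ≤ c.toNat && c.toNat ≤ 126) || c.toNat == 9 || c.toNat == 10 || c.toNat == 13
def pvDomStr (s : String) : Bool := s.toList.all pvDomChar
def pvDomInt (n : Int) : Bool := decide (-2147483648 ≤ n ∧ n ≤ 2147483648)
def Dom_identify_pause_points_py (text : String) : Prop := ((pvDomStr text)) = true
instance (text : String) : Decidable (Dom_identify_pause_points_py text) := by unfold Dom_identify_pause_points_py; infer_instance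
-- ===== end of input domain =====

-- B walks the text with str.find('\n') keeping absolute offsets instead of splitting into
-- lines and accumulating a character counter (objective: alternative; return value only).

-- ===== PORT A =====
-- for line in text.split('\n'): if line.strip().startswith('##'): pts.append(char_count); char_count += len(line)+1
def identify_pause_points_py (text : String) : List Int :=
  let lines := (PySem.Str.split? text "\n").getD []   -- sep "\n" ≠ "": split? is always `some` here
  (lines.foldl
    (fun (st : List Int × Int) line =>
      (if PySem.Str.startswith (PySem.Str.strip line) "##" then st.1 ++ [st.2] else st.1,
       st.2 + PySem.Str.len line + 1))
    ([], 0)).1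

-- ===== PORT B =====
-- rest.lstrip(' \t\r\x0b\x0c'): lstrip(chars) drops the leading characters of the set — exact
def pvWsChar (c : Char) : Bool :=
  c == ' ' || c == '\t' || c == '\r' || c == Char.ofNat 11 || c == Char.ofNat 12

-- rest.lstrip(' \t\r\x0b\x0c').startswith('##')
def pvHitB (rest : List Char) : Bool :=
  PySem.Chars.startswith (rest.dropWhile pvWsChar) ['#', '#']

-- the while-loop of Source B: state (pause_points, offset, rest)
def pvGoB (pts : List Int) (offset : Int) (rest : List Char) : List Int :=
  let pts' := if pvHitB rest then pts ++ [offset] else pts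
  if h : PySem.Chars.find rest ['\n'] = -1 then pts'
  else
    pvGoB pts' (offset + PySem.Chars.find rest ['\n'] + 1)
      (rest.drop ((PySem.Chars.find rest ['\n']).toNat + 1))
termination_by rest.length
decreasing_by
  have h1 := PySem.Chars.neg_one_le_find rest ['\n']
  have h2 : ['\n'] <:+: rest := (PySem.Chars.find_nonneg_iff rest ['\n']).mp (by omega)
  have h3 : rest ≠ [] := by
    intro hnil; rw [hnil] at h2
    exact (List.not_mem_nil (a := '\n')) ((List.singleton_infix_iff '\n' []).mp h2)
  have h4 : 0 < rest.length := List.length_pos_iff.mpr h3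
  simp only [List.length_drop]; omega

def identify_pause_points_py_alt (text : String) : List Int :=
  pvGoB [] 0 text.toList

-- ===== PRECONDITION & SPEC =====
def Spec_identify_pause_points_py (text : String) (out : List Int) : Prop := out = identify_pause_points_py_alt text
instance (text : String) (out : List Int) : Decidable (Spec_identify_pause_points_py text out) := by unfold Spec_identify_pause_points_py; infer_instance

-- ===== CLAIM (what is proved, stated in full; the proofs are below) =====
def Claim_equal_identify_pause_points_py : Prop := ∀ (text : String), Dom_identify_pause_points_py text → Spec_identify_pause_points_py text (identify_pause_points_py text)

-- ===== LEMMAS AND PROOFS =====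

-- reference decomposition of text.split('\n'): pvSplitNl pre l = the lines of pre ++ l,
-- where pre (newline-free) is the already-consumed part of the current line
def pvSplitNl : List Char → List Char → List (List Char)
  | pre, [] => [pre]
  | pre, c :: r => if c = '\n' then pre :: pvSplitNl [] r else pvSplitNl (pre ++ [c]) r

-- A's per-line loop body, on the char level
def pvStepA (st : List Int × Int) (l : List Char) : List Int × Int :=
  (if PySem.Chars.startswith (PySem.Chars.strip l) ['#', '#'] then st.1 ++ [st.2] else st.1,
   st.2 + (l.length : Int) + 1)

theorem pvGo_spec : ∀ (fuel : Nat) (l cur : List Char) (acc : List (List Char)) (_ : l.length < fuel),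
    PySem.Chars.splitOn.go ['\n'] fuel l cur acc
      = acc.reverse ++ pvSplitNl cur.reverse l := by
  intro fuel
  induction fuel with
  | zero => intro l cur acc h; omega
  | succ f ih =>
    intro l cur acc h
    cases l with
    | nil =>
      rw [PySem.Chars.splitOn.go]
      simp [pvSplitNl]
      omega
    | cons c rest =>
      rw [PySem.Chars.splitOn.go]
      by_cases hc : c = '\n'
      · subst hc
        have hp : List.isPrefixOf ['\n'] ('\n' :: rest) = true := by simp [List.isPrefixOf]
        rw [if_pos hp]
        simp only [List.length_cons, List.length_nil, Nat.zero_add, List.drop_succ_cons,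
          List.drop_zero]
        rw [ih rest [] (cur.reverse :: acc) (by simp at h ⊢; omega)]
        simp [pvSplitNl]
      · have hp : List.isPrefixOf ['\n'] (c :: rest) = true → False := by
          simp [List.isPrefixOf]; exact fun h' => hc h'.symm
        rw [if_neg hp]
        rw [ih rest (c :: cur) acc (by simp at h ⊢; omega)]
        simp [pvSplitNl, hc]

theorem pvSplitOn_eq (s : List Char) : PySem.Chars.splitOn s ['\n'] = pvSplitNl [] s := by
  rw [PySem.Chars.splitOn, pvGo_spec (s.length + 1) s [] [] (by omega)]
  simp

theorem pvSplitNl_no_nl (l : List Char) : ∀ (pre : List Char), '\n' ∉ l →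
    pvSplitNl pre l = [pre ++ l] := by
  induction l with
  | nil => intro pre h; simp [pvSplitNl]
  | cons c r ih =>
    intro pre h
    have hc : c ≠ '\n' := fun hh => h (hh ▸ List.mem_cons_self)
    simp only [pvSplitNl, if_neg hc]
    rw [ih (pre ++ [c]) (fun hm => h (List.mem_cons_of_mem _ hm))]
    simp

theorem pvSplitNl_break (a : List Char) : ∀ (b pre : List Char), '\n' ∉ a →
    pvSplitNl pre (a ++ '\n' :: b) = (pre ++ a) :: pvSplitNl [] b := by
  induction a with
  | nil => intro b pre h; simp [pvSplitNl]
  | cons c r ih =>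
    intro b pre h
    have hc : c ≠ '\n' := fun hh => h (hh ▸ List.mem_cons_self)
    simp only [List.cons_append, pvSplitNl, if_neg hc]
    rw [ih b (pre ++ [c]) (fun hm => h (List.mem_cons_of_mem _ hm))]
    simp

theorem pvIsspace_eq_ws (c : Char) (hdom : pvDomChar c = true) (hne : c ≠ '\n') :
    PySem.Chars.isspace c = pvWsChar c := by
  have e : ∀ (d : Char), c = d ↔ c.toNat = d.toNat :=
    fun d => ⟨fun h => by rw [h], fun h => Char.ext (UInt32.toNat_inj.mp h)⟩
  have hne' : c.toNat ≠ 10 := fun h => hne ((e _).mpr h)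
  simp only [pvDomChar, Bool.or_eq_true, Bool.and_eq_true, decide_eq_true_eq, beq_iff_eq] at hdom
  rw [Bool.eq_iff_iff]
  simp only [PySem.Chars.isspace, pvWsChar, Bool.or_eq_true, Bool.and_eq_true,
    decide_eq_true_eq, beq_iff_eq, e, Char.reduceToNat]
  omega

theorem pvDropWhile_congr (p q : Char → Bool) (l : List Char) (h : ∀ c ∈ l, p c = q c) :
    l.dropWhile p = l.dropWhile q := by
  induction l with
  | nil => rfl
  | cons c r ih =>
    simp only [List.dropWhile_cons, h c List.mem_cons_self]
    split
    · exact ih (fun x hx => h x (List.mem_cons_of_mem _ hx))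
    · rfl

theorem pvRstrip_hit (r : List Char) :
    PySem.Chars.startswith (PySem.Chars.rstrip r) ['#', '#']
      = PySem.Chars.startswith r ['#', '#'] := by
  simp only [PySem.Chars.startswith, PySem.Chars.rstrip]
  have hsharp : PySem.Chars.isspace '#' = false := by decide
  rcases hb : List.isPrefixOf ['#', '#'] r with _ | _
  · rw [Bool.eq_false_iff]
    intro hpre
    have h1 : (List.dropWhile PySem.Chars.isspace r.reverse).reverse <+: r := by
      apply List.reverse_suffix.mp
      rw [List.reverse_reverse]
      exact List.dropWhile_suffix _
    have h2 : ['#','#'] <+: r :=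
      List.IsPrefix.trans (List.isPrefixOf_iff_prefix.mp hpre) h1
    have h3 : List.isPrefixOf ['#','#'] r = true := by
      rw [List.isPrefixOf_iff_prefix]; exact h2
    rw [hb] at h3; exact Bool.noConfusion h3
  · obtain ⟨t, rfl⟩ := (List.isPrefixOf_iff_prefix.mp hb)
    have hr : (['#','#'] ++ t : List Char).reverse = t.reverse ++ ['#','#'] := by simp
    rw [hr, List.dropWhile_append]
    split
    · simp [List.dropWhile, hsharp, List.isPrefixOf]
    · simp [List.isPrefixOf]

theorem pvHit_eq (a tail : List Char) (hdom : ∀ c ∈ a, pvDomChar c = true) (hnl : '\n' ∉ a)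
    (htail : tail = [] ∨ ∃ b, tail = '\n' :: b) :
    PySem.Chars.startswith (PySem.Chars.strip a) ['#', '#'] = pvHitB (a ++ tail) := by
  have hls : PySem.Chars.lstrip a = a.dropWhile pvWsChar := by
    rw [PySem.Chars.lstrip]
    exact pvDropWhile_congr _ _ a
      (fun c hc => pvIsspace_eq_ws c (hdom c hc) (fun h => hnl (h ▸ hc)))
  rw [PySem.Chars.strip, hls, pvHitB, List.dropWhile_append]
  by_cases he : (a.dropWhile pvWsChar).isEmpty
  · rw [if_pos he]
    rw [List.isEmpty_iff.mp he]
    have hwnl : pvWsChar '\n' = false := by decide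
    rcases htail with rfl | ⟨b, rfl⟩
    · simp [PySem.Chars.rstrip, PySem.Chars.startswith]
    · simp [PySem.Chars.rstrip, PySem.Chars.startswith, List.isPrefixOf, hwnl]
  · rw [if_neg he, pvRstrip_hit]
    obtain ⟨c, r', hcr⟩ : ∃ c r', a.dropWhile pvWsChar = c :: r' := by
      cases hx : a.dropWhile pvWsChar with
      | nil => rw [hx] at he; simp at he
      | cons c r' => exact ⟨c, r', rfl⟩
    rw [hcr]
    cases r' with
    | cons d r'' => simp [PySem.Chars.startswith, List.isPrefixOf]
    | nil =>
      rcases htail with rfl | ⟨b, rfl⟩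
      · simp
      · simp [PySem.Chars.startswith, List.isPrefixOf]

theorem pvMain (n : Nat) : ∀ (rest : List Char), rest.length ≤ n →
    (∀ c ∈ rest, pvDomChar c = true) → ∀ (pts : List Int) (off : Int),
    ((pvSplitNl [] rest).foldl pvStepA (pts, off)).1 = pvGoB pts off rest := by
  induction n with
  | zero =>
    intro rest h _ pts off
    have hm : rest = [] := List.eq_nil_of_length_eq_zero (by omega)
    subst hm
    rw [pvGoB]
    have h1 : PySem.Chars.find ([] : List Char) ['\n'] = -1 := by decide
    have h2 : pvHitB [] = false := by decide
    have h3 : PySem.Chars.startswith (PySem.Chars.strip []) ['#','#'] = false := by decide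
    simp [pvSplitNl, pvStepA, h1, h2, h3]
  | succ m ih =>
    intro rest hlen hdom pts off
    by_cases hf : PySem.Chars.find rest ['\n'] = -1
    · have hnl : '\n' ∉ rest := by
        intro hm
        exact ((PySem.Chars.find_eq_neg_one_iff rest ['\n']).mp hf)
          ((List.singleton_infix_iff _ _).mpr hm)
      rw [pvSplitNl_no_nl rest [] hnl, pvGoB, dif_pos hf]
      simp only [List.nil_append, List.foldl_cons, List.foldl_nil, pvStepA]
      have hh := pvHit_eq rest [] hdom hnl (Or.inl rfl)
      rw [List.append_nil] at hh
      rw [hh]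
    · have h0 : 0 ≤ PySem.Chars.find rest ['\n'] := by
        have := PySem.Chars.neg_one_le_find rest ['\n']; omega
      obtain ⟨hpre, hmin⟩ := PySem.Chars.find_spec (s := rest) (sub := ['\n']) h0
      set k := (PySem.Chars.find rest ['\n']).toNat with hkdef
      have hklt : k < rest.length := by
        by_contra hge
        rw [List.drop_eq_nil_of_le (by omega)] at hpre
        obtain ⟨t, ht⟩ := hpre
        simp at ht
      have hdropk : rest.drop k = '\n' :: rest.drop (k + 1) := by
        obtain ⟨t, ht⟩ := hpre
        rw [List.drop_eq_getElem_cons hklt] at ht ⊢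
        have hl : ('\n' :: t : List Char) = rest[k] :: rest.drop (k+1) := ht
        injection hl with h1 h2
        rw [← h1]
      have hrest : rest = rest.take k ++ '\n' :: rest.drop (k + 1) := by
        conv_lhs => rw [← List.take_append_drop k rest, hdropk]
      have hnotin : '\n' ∉ rest.take k := by
        intro hm
        obtain ⟨i, hi, hgi⟩ := List.mem_iff_getElem.mp hm
        have hik : i < k := by simp [List.length_take] at hi; omega
        apply hmin i hik
        rw [List.drop_eq_getElem_cons (by omega : i < rest.length)]
        rw [List.getElem_take] at hgi
        rw [hgi]
        exact ⟨_, rfl⟩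
      have hdomtake : ∀ c ∈ rest.take k, pvDomChar c = true :=
        fun c hc => hdom c (List.mem_of_mem_take hc)
      conv_lhs => rw [hrest]
      rw [pvSplitNl_break _ _ _ hnotin]
      simp only [List.nil_append, List.foldl_cons, pvStepA]
      rw [ih (rest.drop (k + 1)) (by simp; omega)
        (fun c hc => hdom c (List.mem_of_mem_drop hc))]
      conv_rhs => rw [pvGoB]
      rw [dif_neg hf, ← hkdef]
      have hhit : PySem.Chars.startswith (PySem.Chars.strip (rest.take k)) ['#','#']
          = pvHitB rest := by
        conv_rhs => rw [hrest]
        exact pvHit_eq _ _ hdomtake hnotin (Or.inr ⟨_, rfl⟩)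
      rw [hhit]
      have hlentake : ((rest.take k).length : Int) = PySem.Chars.find rest ['\n'] := by
        rw [List.length_take]
        have : min k rest.length = k := by omega
        rw [this, hkdef, Int.toNat_of_nonneg h0]
      rw [hlentake]

-- ===== VERDICT (by name: the statement is the Claim_ definition above) =====
theorem identify_pause_points_py_spec : Claim_equal_identify_pause_points_py := by
  intro text hdom
  unfold Spec_identify_pause_points_py identify_pause_points_py identify_pause_points_py_alt
  have hdom' : ∀ c ∈ text.toList, pvDomChar c = true := by
    have := hdom
    unfold Dom_identify_pause_points_py pvDomStr at this
    simpa [List.all_eq_true] using this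
  have hsep : ("\n" : String).toList = ['\n'] := by decide
  have hsplit : PySem.Str.split? text "\n"
      = some ((PySem.Chars.splitOn text.toList ['\n']).map String.ofList) := by
    rw [PySem.Str.split?, hsep, PySem.Chars.split?]
    simp
  rw [hsplit]
  simp only [Option.getD_some, List.foldl_map]
  have hstep : ∀ (st : List Int × Int) (l : List Char),
      (if PySem.Str.startswith (PySem.Str.strip (String.ofList l)) "##" then st.1 ++ [st.2]
        else st.1,
       st.2 + PySem.Str.len (String.ofList l) + 1) = pvStepA st l := by
    intro st l
    rw [pvStepA, PySem.Str.startswith, PySem.Str.strip, PySem.Str.len,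
      String.toList_ofList, String.toList_ofList]
    have h2 : ("##" : String).toList = ['#','#'] := by decide
    rw [h2]
  simp only [hstep]
  rw [pvSplitOn_eq]
  exact pvMain text.toList.length text.toList (le_refl _) hdom' [] 0
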